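-- pv_equiv track=rewrite | github.com/meghnalal/HackerRankQuestion- | Sliding_window /2269_Find_k_Beauty_of_number.py | k_beauty
-- ===== SOURCE A (Python) =====
-- def k_beauty(num, k):
--     num_str = str(num)
--     count = 0
--
--     for i in range(len(num_str) - k + 1):
--         substring = num_str[i:i + k]
--         substring_num = int(substring)
--
--         if substring_num != 0 and num % substring_num == 0:
--             count += 1
--
--     return count
-- ===== SOURCE B (Python) =====
-- def k_beauty(num, k):
--     s = str(num)
--     count = 0
--     while len(s) >= k:
--         w = int(s[-k:])
--         if w != 0 and num % w == 0:
--             count += 1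
--         s = s[:-1]
--     return count
-- ===== Notes on version B (the rewrite author's own statement) =====
-- stated objective: alternative
-- what changed: B replaces A's index loop over slice starts (s[i:i+k] for i in range(len-k+1)) by a string-consuming loop that repeatedly tests the last k characters of a shrinking prefix (w = int(s[-k:]); s = s[:-1]), visiting the windows right-to-left with no index arithmetic.
import Mathlib
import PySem

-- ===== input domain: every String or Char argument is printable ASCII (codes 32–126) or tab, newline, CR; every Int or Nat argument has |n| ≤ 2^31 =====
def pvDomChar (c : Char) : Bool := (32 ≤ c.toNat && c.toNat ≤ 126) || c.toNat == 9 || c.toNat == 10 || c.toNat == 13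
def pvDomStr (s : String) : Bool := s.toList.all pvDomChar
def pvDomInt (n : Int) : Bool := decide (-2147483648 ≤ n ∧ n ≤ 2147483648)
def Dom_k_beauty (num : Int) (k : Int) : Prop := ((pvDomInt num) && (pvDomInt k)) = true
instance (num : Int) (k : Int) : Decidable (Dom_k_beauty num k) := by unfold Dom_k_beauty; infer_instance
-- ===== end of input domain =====

-- B visits the same k-character windows as A, but right-to-left by consuming the string from
-- the end (`w = int(s[-k:]); s = s[:-1]`) instead of A's index loop over slice starts
-- (objective: alternative decomposition, same cost).

-- ===== PORT A =====
def k_beauty (num : Int) (k : Int) : Int :=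
  let numStr : List Char := PySem.Int.toChars num      -- num_str = str(num)
  (PySem.List.pyRange 0 (PySem.List.len numStr - k + 1) 1).foldl
    (fun count i =>
      let substring := PySem.List.slice numStr (some i) (some (i + k))   -- num_str[i:i+k]
      let substringNum := (PySem.Int.ofChars? substring).getD 0          -- int(substring); none (ValueError) excluded by Pre_
      if substringNum ≠ 0 ∧ PySem.Int.mod num substringNum = 0 then count + 1 else count)
    0

-- ===== PORT B =====
-- the while loop of Source B: `while len(s) >= k: w = int(s[-k:]); …; s = s[:-1]`
def kbGo (num : Int) (k : Int) (s : List Char) (count : Int) : Int :=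
  if (s.length : Int) < k then count
  else if _hs : s = [] then count    -- totalizing guard only: reachable only for k ≤ 0, where Python B raises int('') (outside Pre_)
  else
    let w := (PySem.Int.ofChars? (PySem.List.slice s (some (-k)) none)).getD 0   -- w = int(s[-k:])
    let count' := if w ≠ 0 ∧ PySem.Int.mod num w = 0 then count + 1 else count
    kbGo num k s.dropLast count'                                                  -- s = s[:-1]
termination_by s.length
decreasing_by
  have : s.length ≠ 0 := fun h => _hs (List.eq_nil_of_length_eq_zero h)
  simp [List.length_dropLast]; omega

def k_beauty_alt (num : Int) (k : Int) : Int :=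
  kbGo num k (PySem.Int.toChars num) 0

-- ===== PRECONDITION & SPEC =====
-- Pre_ excludes exactly the inputs where Python A raises ValueError: k ≤ 0 (the loop reaches an
-- empty slice, int('')) and negative num with k = 1 (the window '-', int('-')).
def Pre_k_beauty (num : Int) (k : Int) : Prop := 1 ≤ k ∧ (num < 0 → 2 ≤ k)
instance (num : Int) (k : Int) : Decidable (Pre_k_beauty num k) := by unfold Pre_k_beauty; infer_instance

def pvWitness_k_beauty : Int × Int := (240, 2)

def Spec_k_beauty (num : Int) (k : Int) (out : Int) : Prop := out = k_beauty_alt num k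
instance (num : Int) (k : Int) (out : Int) : Decidable (Spec_k_beauty num k out) := by unfold Spec_k_beauty; infer_instance

-- ===== CLAIM (what is proved, stated in full; the proofs are below) =====
def Claim_equal_k_beauty : Prop := ∀ (num : Int) (k : Int), Dom_k_beauty num k → Pre_k_beauty num k → Spec_k_beauty num k (k_beauty num k)

-- ===== LEMMAS AND PROOFS =====

-- the contribution of one window w to the count
def kbHit (num : Int) (w : List Char) : Int :=
  if (PySem.Int.ofChars? w).getD 0 ≠ 0 ∧ PySem.Int.mod num ((PySem.Int.ofChars? w).getD 0) = 0 then 1 else 0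

-- the common yardstick: the sum of the window contributions, windows indexed by their start
def kbSum (num : Int) (K : Nat) (s : List Char) : Int :=
  ((List.range (s.length + 1 - K)).map (fun i => kbHit num ((s.drop i).take K))).sum

theorem kb_foldl_add (f : Nat → Int) (l : List Nat) (c : Int) :
    l.foldl (fun a x => a + f x) c = c + (l.map f).sum := by
  induction l generalizing c with
  | nil => simp
  | cons x xs ih => simp [ih]; ring

-- A's loop is the left-to-right window sum
theorem kbA_eq_gen (num k : Int) (hk : 1 ≤ k) (s : List Char) :
    (PySem.List.pyRange 0 (PySem.List.len s - k + 1) 1).foldl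
      (fun count i =>
        let substring := PySem.List.slice s (some i) (some (i + k))
        let substringNum := (PySem.Int.ofChars? substring).getD 0
        if substringNum ≠ 0 ∧ PySem.Int.mod num substringNum = 0 then count + 1 else count)
      0 = kbSum num k.toNat s := by
  rw [PySem.List.pyRange_one, List.foldl_map]
  rw [List.foldl_ext _ (fun c j => c + kbHit num ((s.drop j).take k.toNat)) 0 ?_]
  · rw [kb_foldl_add, kbSum]
    have hn : ((s.length : Int) - k + 1 - 0).toNat = s.length + 1 - k.toNat := by omega
    simp only [PySem.List.len_eq]
    rw [hn, zero_add]
  · intro c j _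
    simp only
    have h1 : (0 : Int) + (j : Int) = (j : Int) := by ring
    rw [h1]
    rw [PySem.List.slice_toNat s (by positivity) (show (0:Int) ≤ (j:Int) + k by omega)]
    have h3 : ((j : Int) + k).toNat - (j : Int).toNat = k.toNat := by omega
    rw [h3, Int.toNat_natCast, kbHit]
    split_ifs <;> ring

-- B's loop accumulates the same window sum, right to left over shrinking prefixes
theorem kbB_eq_gen (num k : Int) (hk : 1 ≤ k) :
    ∀ (n : Nat) (p : List Char), p.length = n → ∀ (c : Int), kbGo num k p c = c + kbSum num k.toNat p := by
  intro n
  induction n using Nat.strong_induction_on with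
  | _ n ih =>
    intro p hp c
    rw [kbGo]
    by_cases hlt : (p.length : Int) < k
    · rw [if_pos hlt]
      have h0 : p.length + 1 - k.toNat = 0 := by omega
      simp [kbSum, h0]
    · rw [if_neg hlt]
      have hK : k.toNat ≤ p.length := by omega
      have hne : p ≠ [] := by
        intro h; subst h; simp at hK; omega
      rw [dif_neg hne]
      simp only
      have hkk : -k = -((k.toNat : Int)) := by omega
      rw [hkk, PySem.List.slice_from_neg_natCast p k.toNat (by omega)]
      have hlen : p.dropLast.length = p.length - 1 := List.length_dropLast
      have hrec := ih (n - 1) (by omega) p.dropLast (by omega)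
      rw [hrec]
      have hsplit : kbSum num k.toNat p
          = kbSum num k.toNat p.dropLast + kbHit num (p.drop (p.length - k.toNat)) := by
        unfold kbSum
        have h1 : p.length + 1 - k.toNat = (p.length - k.toNat) + 1 := by omega
        rw [h1, List.range_succ, List.map_append, List.sum_append]
        have h2 : p.dropLast.length + 1 - k.toNat = p.length - k.toNat := by omega
        rw [h2]
        have h3 : (List.range (p.length - k.toNat)).map
              (fun i => kbHit num ((p.dropLast.drop i).take k.toNat))
            = (List.range (p.length - k.toNat)).map
              (fun i => kbHit num ((p.drop i).take k.toNat)) := by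
          apply List.map_congr_left
          intro i hi
          rw [List.mem_range] at hi
          rw [List.dropLast_eq_take, List.drop_take, List.take_take,
              min_eq_left (by omega)]
        rw [h3]
        have h4 : (p.drop (p.length - k.toNat)).take k.toNat = p.drop (p.length - k.toNat) := by
          apply List.take_of_length_le
          simp [List.length_drop]
          omega
        simp [h4]
      rw [hsplit, kbHit]
      split_ifs <;> ring

-- ===== VERDICT (by name: the statement is the Claim_ definition above) =====
theorem k_beauty_spec : Claim_equal_k_beauty := by
  intro num k _hdom hpre
  unfold Spec_k_beauty k_beauty_alt k_beauty
  rw [kbA_eq_gen num k hpre.1, kbB_eq_gen num k hpre.1 _ _ rfl, zero_add]
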